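-- pv_equiv track=rewrite | github.com/mariia-rybakova/AlbumDesigner | utils/selection_tools.py | select_by_cluster
-- ===== SOURCE A (Python) =====
-- def select_by_cluster(clusters_ids,image_order_dict):
--     final_selected_images = []
--
--     for cluster_label, images_in_cluster in clusters_ids.items():
--
--         # if i have 4 images i choose one of them if more then i choose more
--         if len(images_in_cluster) <= 3:
--             # Select image with highest 'order_score' in the cluster
--             best_image = min(images_in_cluster, key=lambda img: image_order_dict.get(img, float('inf')))
--             final_selected_images.append(best_image)
--         else:
--             n = round(len(images_in_cluster) / 4)
--
--             images_order = sorted(images_in_cluster,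
--                                   key=lambda img: image_order_dict.get(img, float('inf')), reverse=True)
--             final_selected_images.append(images_order[n])
--
--     return final_selected_images
-- ===== SOURCE B (Python) =====
-- def _quickselect(items, n):
--     # rank-n element (0-based) of a list of distinct keys under plain '<'.
--     while True:
--         m = len(items) // 2
--         p = items[m]
--         rest = items[:m] + items[m + 1:]
--         before = [t for t in rest if t < p]
--         if n < len(before):
--             items = before
--         elif n == len(before):
--             return p
--         else:
--             n = n - len(before) - 1
--             items = [t for t in rest if not t < p]
--
--
-- def _best(images, order):
--     # first image with minimal order score (missing score = +infinity)
--     INF = float('inf')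
--     best = images[0]
--     bk = order.get(best, INF)
--     for img in images[1:]:
--         k = order.get(img, INF)
--         if k < bk:
--             best, bk = img, k
--     return best
--
--
-- def _pick(images, order):
--     if len(images) <= 3:
--         return _best(images, order)
--     n = round(len(images) / 4)
--     # (negated score, original index): ascending '<' on these distinct pairs
--     # is exactly the order of sorted(key=score, reverse=True) with its
--     # stable tie-break; the image itself rides along as payload.
--     INF = float('inf')
--     keyed = [(-order.get(img, INF), i, img) for i, img in enumerate(images)]
--     return _quickselect(keyed, n)[2]
--
--
-- def select_by_cluster(clusters_ids, image_order_dict):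
--     return [_pick(images, image_order_dict)
--             for _label, images in clusters_ids.items()]
-- ===== Notes on version B (the rewrite author's own statement) =====
-- stated objective: alternative
-- what changed: Replaces the per-cluster full stable reverse sort (and min with key) by a quickselect partition selection at rank round(k/4) on precomputed (negated score, original index, image) triples, plus an explicit running-minimum scan for small clusters; a different selection algorithm of comparable measured cost (CPython's C-coded sorted() keeps A's wall-clock times at least as good, so nothing is claimed about speed).
import Mathlib
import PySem

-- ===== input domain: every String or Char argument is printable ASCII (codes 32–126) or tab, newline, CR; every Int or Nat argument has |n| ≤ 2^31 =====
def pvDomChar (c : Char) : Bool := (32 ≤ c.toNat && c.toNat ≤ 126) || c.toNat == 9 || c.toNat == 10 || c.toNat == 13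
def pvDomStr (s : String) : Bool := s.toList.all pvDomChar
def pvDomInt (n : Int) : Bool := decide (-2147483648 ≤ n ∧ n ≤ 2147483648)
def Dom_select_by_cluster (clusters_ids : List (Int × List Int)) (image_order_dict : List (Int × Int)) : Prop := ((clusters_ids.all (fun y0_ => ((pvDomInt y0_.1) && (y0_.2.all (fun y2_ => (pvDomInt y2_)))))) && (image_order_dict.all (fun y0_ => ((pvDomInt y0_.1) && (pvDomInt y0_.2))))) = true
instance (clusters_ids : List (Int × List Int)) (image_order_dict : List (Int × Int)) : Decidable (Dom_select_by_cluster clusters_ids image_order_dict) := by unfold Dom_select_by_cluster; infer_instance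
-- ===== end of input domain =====

-- ===== PORT A =====
-- B differs from A: quickselect (rank-n partition selection) on precomputed
-- (negated score, index, image) triples instead of a full stable reverse sort,
-- and an explicit running-minimum scan instead of min(..., key=...); objective: alternative.
-- Shared helper: image_order_dict.get(img, float('inf')); float('inf') is modeled by 2^63,
-- exact on Dom (all scores have |v| ≤ 2^31 < 2^63).
def keyOf (order : List (Int × Int)) (img : Int) : Int :=
  match PySem.Dict.get? (PySem.Dict.mk order) img with
  | some v => v
  | none => 9223372036854775808

-- Shared helper: round(k/4) with Python's banker's rounding (k/4 is an exact binary
-- float for any list length, so ties occur exactly at k % 4 = 2).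
def pyRound4 (k : Nat) : Nat :=
  if k % 4 = 3 ∨ (k % 4 = 2 ∧ (k / 4) % 2 = 1) then k / 4 + 1 else k / 4

def select_by_cluster (clusters_ids : List (Int × List Int)) (image_order_dict : List (Int × Int)) : List Int :=
  clusters_ids.foldl (fun final_selected_images c =>
    let images_in_cluster := c.2
    if images_in_cluster.length ≤ 3 then
      -- min(images_in_cluster, key=...): first minimal element; ValueError on an
      -- empty cluster (min? = none there) is excluded by Pre_, .getD 0 is never taken.
      final_selected_images ++ [(PySem.List.min? images_in_cluster (keyOf image_order_dict)).getD 0]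
    else
      let n := pyRound4 images_in_cluster.length
      -- images_order[n]: n < length always holds here (round(k/4) < k for k ≥ 4),
      -- so the pyGetD default 0 is never taken (no IndexError).
      final_selected_images ++
        [PySem.List.pyGetD (PySem.List.sorted images_in_cluster (keyOf image_order_dict) true) (n : Int) 0])
    []

-- ===== PORT B =====
-- Python tuple comparison on the (negated score, index, image) triples: full
-- three-component lexicographic '<' (the third component is never decisive on
-- the triples B builds, since their indices are distinct, but the port compares
-- it exactly as Python would).
def tripLt (a b : Int × Int × Int) : Bool :=
  a.1 < b.1 || (a.1 == b.1 && (a.2.1 < b.2.1 || (a.2.1 == b.2.1 && a.2.2 < b.2.2)))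

-- _quickselect: while-True loop as structural recursion on a fuel counter set to
-- items.length (each round drops the pivot, so the list is always shorter than the remaining fuel;
-- the fuel-0 and empty-items guards only make the recursion total and are never
-- reached, since callers maintain n < items.length).
def qselGo (fuel : Nat) (items : List (Int × Int × Int)) (n : Nat) : Int × Int × Int :=
  match fuel with
  | 0 => (0, 0, 0)
  | fuel + 1 =>
    if items.length = 0 then (0, 0, 0)
    else
      let m := items.length / 2
      let p := items.getD m (0, 0, 0)
      let rest := items.take m ++ items.drop (m + 1)
      let before := rest.filter (fun t => tripLt t p)
      if n < before.length then qselGo fuel before n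
      else if n = before.length then p
      else qselGo fuel (rest.filter (fun t => !tripLt t p)) (n - before.length - 1)

def qsel (items : List (Int × Int × Int)) (n : Nat) : Int × Int × Int :=
  qselGo items.length items n

-- _best: running-minimum scan (best image and its cached score); the images = []
-- case (IndexError in Python B) is excluded by Pre_.
def bestOf (images : List Int) (order : List (Int × Int)) : Int :=
  match images with
  | [] => 0
  | x :: t =>
    (t.foldl (fun bb img =>
        let k := keyOf order img
        if k < bb.2 then (img, k) else bb)
      (x, keyOf order x)).1

def pickOne (images : List Int) (order : List (Int × Int)) : Int :=
  if images.length ≤ 3 then bestOf images order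
  else
    let n := pyRound4 images.length
    let keyed := (PySem.List.enumerate images 0).map (fun t => (-(keyOf order t.2), t.1, t.2))
    (qsel keyed n).2.2

def select_by_cluster_alt (clusters_ids : List (Int × List Int)) (image_order_dict : List (Int × Int)) : List Int :=
  clusters_ids.map (fun c => pickOne c.2 image_order_dict)

-- ===== PRECONDITION & SPEC =====
-- Pre_ excludes exactly the inputs on which A raises: a cluster with an empty image
-- list makes A's min([]) raise ValueError (and B's images[0] raise IndexError).
def Pre_select_by_cluster (clusters_ids : List (Int × List Int)) (image_order_dict : List (Int × Int)) : Prop :=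
  ∀ c ∈ clusters_ids, c.2 ≠ []
instance (clusters_ids : List (Int × List Int)) (image_order_dict : List (Int × Int)) : Decidable (Pre_select_by_cluster clusters_ids image_order_dict) := by unfold Pre_select_by_cluster; infer_instance

def pvWitness_select_by_cluster : (List (Int × List Int)) × (List (Int × Int)) :=
  ([(1, [10, 11]), (2, [20, 21, 22, 23, 24])], [(10, 3), (11, 1), (21, 5), (22, 4), (23, 9)])

def Spec_select_by_cluster (clusters_ids : List (Int × List Int)) (image_order_dict : List (Int × Int)) (out : List Int) : Prop := out = select_by_cluster_alt clusters_ids image_order_dict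
instance (clusters_ids : List (Int × List Int)) (image_order_dict : List (Int × Int)) (out : List Int) : Decidable (Spec_select_by_cluster clusters_ids image_order_dict out) := by unfold Spec_select_by_cluster; infer_instance

-- ===== CLAIM (what is proved, stated in full; the proofs are below) =====
def Claim_equal_select_by_cluster : Prop := ∀ (clusters_ids : List (Int × List Int)) (image_order_dict : List (Int × Int)), Dom_select_by_cluster clusters_ids image_order_dict → Pre_select_by_cluster clusters_ids image_order_dict → Spec_select_by_cluster clusters_ids image_order_dict (select_by_cluster clusters_ids image_order_dict)

-- ===== LEMMAS AND PROOFS =====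

-- The strict linear order B's triples carry: full three-component lexicographic order.
def K3 (t : Int × Int × Int) : Lex (Int × Lex (Int × Int)) := toLex (t.1, toLex (t.2.1, t.2.2))

-- The strict linear order naming a position of A's stable reverse sort:
-- score descending (negated score ascending), original index ascending.
def keyL (order : List (Int × Int)) (t : Int × Int) : Lex (Int × Int) := toLex (-(keyOf order t.2), t.1)

lemma tripLt_iff (a b : Int × Int × Int) : tripLt a b = true ↔ K3 a < K3 b := by
  simp [tripLt, K3, Prod.Lex.toLex_lt_toLex]

-- quickselect returns the n-th element of any strictly ordered rearrangement
lemma qselGo_correct (fuel : Nat) (L S : List (Int × Int × Int)) (n : Nat)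
    (hfuel : L.length ≤ fuel)
    (hperm : S.Perm L) (hpw : S.Pairwise (fun a b => K3 a < K3 b)) (hn : n < L.length) :
    qselGo fuel L n = S.getD n (0, 0, 0) := by
  induction fuel generalizing L S n with
  | zero => omega
  | succ fuel ih =>
    have hlen0 : ¬ L.length = 0 := by omega
    have hm : L.length / 2 < L.length := by omega
    set m := L.length / 2 with hmdef
    set p := L.getD m (0, 0, 0) with hpdef
    have hpel : p = L[m] := List.getD_eq_getElem L _ hm
    have hpL : p ∈ L := by rw [hpel]; exact List.getElem_mem hm
    have hpS : p ∈ S := hperm.mem_iff.mpr hpL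
    obtain ⟨S₁, S₂, hSsplit⟩ := List.append_of_mem hpS
    set rest := L.take m ++ L.drop (m + 1) with hrestdef
    have hLsplit : L = L.take m ++ p :: L.drop (m + 1) := by
      rw [hpel]
      conv_lhs => rw [← List.take_append_drop m L]
      rw [List.drop_eq_getElem_cons hm]
    have hrest : (p :: rest).Perm L := by
      conv_rhs => rw [hLsplit]
      exact (List.perm_middle).symm
    have hS' : S.Perm (p :: (S₁ ++ S₂)) := by rw [hSsplit]; exact List.perm_middle
    have hrest2 : rest.Perm (S₁ ++ S₂) := by
      have : (p :: rest).Perm (p :: (S₁ ++ S₂)) := hrest.trans (hperm.symm.trans hS')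
      exact this.cons_inv
    -- order facts
    have hpw' := hSsplit ▸ hpw
    rw [List.pairwise_append] at hpw'
    obtain ⟨hpwS₁, hpwpS₂, hcross⟩ := hpw'
    have hS₁lt : ∀ a ∈ S₁, K3 a < K3 p := fun a ha => hcross a ha p List.mem_cons_self
    have hS₂gt : ∀ b ∈ S₂, K3 p < K3 b := fun b hb => (List.pairwise_cons.mp hpwpS₂).1 b hb
    have hpwS₂ : S₂.Pairwise (fun a b => K3 a < K3 b) := (List.pairwise_cons.mp hpwpS₂).2
    -- filters
    have htrue : ∀ a ∈ S₁, tripLt a p = true := fun a ha => (tripLt_iff a p).mpr (hS₁lt a ha)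
    have hfalse : ∀ b ∈ S₂, tripLt b p = false := fun b hb =>
      Bool.eq_false_iff.mpr (fun h => not_lt_of_gt (hS₂gt b hb) ((tripLt_iff b p).mp h))
    have hfil1 : (S₁ ++ S₂).filter (fun t => tripLt t p) = S₁ := by
      rw [List.filter_append, List.filter_eq_self.mpr htrue,
        List.filter_eq_nil_iff.mpr (fun b hb => by simp [hfalse b hb]), List.append_nil]
    have hfil2 : (S₁ ++ S₂).filter (fun t => !tripLt t p) = S₂ := by
      rw [List.filter_append, List.filter_eq_nil_iff.mpr (fun a ha => by simp [htrue a ha]),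
        List.filter_eq_self.mpr (fun b hb => by simp [hfalse b hb]), List.nil_append]
    set before := rest.filter (fun t => tripLt t p) with hbefdef
    have hbefperm : before.Perm S₁ := by rw [hbefdef, ← hfil1]; exact hrest2.filter _
    have hbeflen : before.length = S₁.length := hbefperm.length_eq
    set after := rest.filter (fun t => !tripLt t p) with haftdef
    have haftperm : after.Perm S₂ := by rw [haftdef, ← hfil2]; exact hrest2.filter _
    have haftlen : after.length = S₂.length := haftperm.length_eq
    have hSlen : S.length = S₁.length + 1 + S₂.length := by rw [hSsplit]; simp; omega
    have hLlen : L.length = S.length := hperm.length_eq.symm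
    -- unfold one step of qselGo
    rw [qselGo]
    rw [if_neg hlen0]
    simp only [← hmdef, ← hpdef, ← hrestdef, ← hbefdef]
    by_cases h1 : n < before.length
    · rw [if_pos h1]
      have hrlen : rest.length + 1 = L.length := by
        rw [hrestdef]; simp only [List.length_append, List.length_take, List.length_drop]; omega
      have hblen : before.length ≤ rest.length := List.length_filter_le _ _
      rw [ih before S₁ n (by omega) hbefperm.symm hpwS₁ h1]
      rw [hSsplit, List.getD_append _ _ _ _ (by omega)]
    · rw [if_neg h1]
      by_cases h2 : n = before.length
      · rw [if_pos h2]
        rw [hSsplit, List.getD_append_right _ _ _ _ (by omega)]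
        rw [h2, hbeflen]
        simp
      · rw [if_neg h2]
        have hrlen : rest.length + 1 = L.length := by
          rw [hrestdef]; simp only [List.length_append, List.length_take, List.length_drop]; omega
        have halen : after.length ≤ rest.length := List.length_filter_le _ _
        rw [ih after S₂ (n - before.length - 1) (by omega) haftperm.symm hpwS₂ (by omega)]
        rw [hSsplit, List.getD_append_right _ _ _ _ (by omega)]
        have : n - S₁.length = n - before.length - 1 + 1 := by omega
        rw [this]
        simp

lemma qsel_correct (L S : List (Int × Int × Int)) (n : Nat)
    (hperm : S.Perm L) (hpw : S.Pairwise (fun a b => K3 a < K3 b)) (hn : n < L.length) :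
    qsel L n = S.getD n (0, 0, 0) :=
  qselGo_correct L.length L S n (le_refl _) hperm hpw hn

-- A's min(..., key=...) is B's running-minimum scan
lemma min?_cons_foldl (order : List (Int × Int)) (x : Int) (t : List Int) :
    PySem.List.min? (x :: t) (keyOf order) =
      some ((t.foldl (fun bb img =>
          let k := keyOf order img
          if k < bb.2 then (img, k) else bb) (x, keyOf order x)).1) := by
  induction t generalizing x with
  | nil => simp [PySem.List.min?]
  | cons y t ih =>
    by_cases h : keyOf order y < keyOf order x
    · have e1 : PySem.List.min? (x :: y :: t) (keyOf order) = PySem.List.min? (y :: t) (keyOf order) := by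
        unfold PySem.List.min?
        simp [List.foldl_cons, h]
      rw [e1, ih]
      simp [List.foldl_cons, h]
    · have e1 : PySem.List.min? (x :: y :: t) (keyOf order) = PySem.List.min? (x :: t) (keyOf order) := by
        unfold PySem.List.min?
        simp [List.foldl_cons, h]
      rw [e1, ih]
      simp [List.foldl_cons, h]

-- stability: A's reverse sort is the (score desc, index asc) sort of the enumerated list
lemma insert_step (order : List (Int × Int)) (i : Int) (x : Int) (acc3 : List (Int × Int))
    (hidx : ∀ t ∈ acc3, t.1 < i) :
    PySem.List.insertBy (fun a b => decide (keyOf order b < keyOf order a)) x (acc3.map Prod.snd)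
      = (PySem.List.insertBy (fun a b => decide (keyL order a < keyL order b)) (i, x) acc3).map Prod.snd := by
  induction acc3 with
  | nil => simp [PySem.List.insertBy]
  | cons u acc ih =>
    have hu : u.1 < i := hidx u List.mem_cons_self
    have hcond : (decide (keyOf order u.2 < keyOf order x)) = (decide (keyL order (i, x) < keyL order u)) := by
      simp only [keyL, Prod.Lex.toLex_lt_toLex, decide_eq_decide]
      constructor
      · intro h; left; omega
      · rintro (h | ⟨h1, h2⟩)
        · omega
        · omega
    simp only [List.map_cons, PySem.List.insertBy, ← hcond]
    split
    · simp
    · simp only [List.map_cons, List.cons.injEq, true_and]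
      exact ih (fun t ht => hidx t (List.mem_cons_of_mem _ ht))

lemma stab_core (order : List (Int × Int)) (xs : List Int) (i : Int) (acc3 : List (Int × Int))
    (hidx : ∀ t ∈ acc3, t.1 < i) :
    xs.foldl (fun acc x => PySem.List.insertBy (fun a b => decide (keyOf order b < keyOf order a)) x acc) (acc3.map Prod.snd)
      = ((PySem.List.enumerate xs i).foldl (fun acc t => PySem.List.insertBy (fun a b => decide (keyL order a < keyL order b)) t acc) acc3).map Prod.snd := by
  induction xs generalizing i acc3 with
  | nil => simp [PySem.List.enumerate_nil]
  | cons x xs ih =>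
    rw [PySem.List.enumerate_cons]
    simp only [List.foldl_cons]
    rw [insert_step order i x acc3 hidx]
    exact ih (i + 1) _ (by
      intro t ht
      rcases (PySem.List.mem_insertBy _ _ _ _).mp ht with h | h
      · subst h; omega
      · have := hidx t h; omega)

lemma stab (order : List (Int × Int)) (xs : List Int) :
    PySem.List.sorted xs (keyOf order) true =
      (PySem.List.sorted (PySem.List.enumerate xs 0) (keyL order) false).map Prod.snd := by
  rw [PySem.List.sorted_rev_eq_foldl_insertBy, PySem.List.sorted_eq_foldl_insertBy]
  simpa using stab_core order xs 0 [] (by simp)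

-- the sorted enumerated list is strictly increasing in keyL (indices are distinct)
lemma sorted_enum_strict (order : List (Int × Int)) (images : List Int) :
    (PySem.List.sorted (PySem.List.enumerate images 0) (keyL order) false).Pairwise
      (fun a b => keyL order a < keyL order b) := by
  set S2 := PySem.List.sorted (PySem.List.enumerate images 0) (keyL order) false with hS2
  have hle : S2.Pairwise (fun a b => keyL order a ≤ keyL order b) :=
    PySem.List.sorted_pairwise _ _
  have hennd : ((PySem.List.enumerate images 0).map Prod.fst).Nodup :=
    (List.pairwise_map.mpr (PySem.List.pairwise_lt_enumerate images 0)).imp ne_of_lt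
  have hperm : (S2.map Prod.fst).Perm ((PySem.List.enumerate images 0).map Prod.fst) :=
    (PySem.List.sorted_perm _ _ _).map _
  have hnd : (S2.map Prod.fst).Nodup := hperm.nodup_iff.mpr hennd
  have hne : S2.Pairwise (fun a b => a.1 ≠ b.1) := List.pairwise_map.mp hnd
  have := hle.and hne
  exact this.imp (fun {a b} h => by
    refine lt_of_le_of_ne h.1 (fun he => h.2 ?_)
    have : (-(keyOf order a.2), a.1) = (-(keyOf order b.2), b.1) := toLex.injective he
    exact (Prod.mk.injEq _ _ _ _ ▸ this).2)

lemma keyL_lt_K3 (order : List (Int × Int)) (a b : Int × Int) (h : keyL order a < keyL order b) :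
    K3 (-(keyOf order a.2), a.1, a.2) < K3 (-(keyOf order b.2), b.1, b.2) := by
  simp only [keyL, Prod.Lex.toLex_lt_toLex] at h
  simp only [K3, Prod.Lex.toLex_lt_toLex]
  rcases h with h | ⟨h1, h2⟩
  · left; exact h
  · right; exact ⟨h1, Or.inl h2⟩

lemma pyRound4_lt (k : Nat) (hk : 4 ≤ k) : pyRound4 k < k := by
  unfold pyRound4; split <;> omega

lemma pick_eq (order : List (Int × Int)) (images : List Int) (hne : images ≠ []) :
    (if images.length ≤ 3 then
        (PySem.List.min? images (keyOf order)).getD 0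
      else
        PySem.List.pyGetD (PySem.List.sorted images (keyOf order) true) ((pyRound4 images.length : Nat) : Int) 0)
      = pickOne images order := by
  by_cases h3 : images.length ≤ 3
  · simp only [h3, if_true, pickOne]
    match images with
    | [] => exact absurd rfl hne
    | x :: t =>
      rw [min?_cons_foldl]
      simp [bestOf]
  · simp only [pickOne, h3, if_false]
    set n := pyRound4 images.length with hndef
    have hn : n < images.length := pyRound4_lt _ (by omega)
    set f : Int × Int → Int × Int × Int := fun t => (-(keyOf order t.2), t.1, t.2) with hfdef
    set S2 := PySem.List.sorted (PySem.List.enumerate images 0) (keyL order) false with hS2def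
    have hlen2 : S2.length = images.length := by
      rw [hS2def, PySem.List.length_sorted, PySem.List.length_enumerate]
    have hstrict := sorted_enum_strict order images
    have hpwK : (S2.map f).Pairwise (fun a b => K3 a < K3 b) :=
      List.pairwise_map.mpr (hstrict.imp (fun {a b} h => keyL_lt_K3 order a b h))
    have hpermK : (S2.map f).Perm ((PySem.List.enumerate images 0).map f) :=
      (PySem.List.sorted_perm _ _ _).map f
    have hkl : ((PySem.List.enumerate images 0).map f).length = images.length := by
      rw [List.length_map, PySem.List.length_enumerate]
    have hq := qsel_correct ((PySem.List.enumerate images 0).map f) (S2.map f) n hpermK hpwK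
      (by omega)
    rw [hq]
    have hn2 : n < (S2.map f).length := by rw [List.length_map]; omega
    rw [List.getD_eq_getElem _ _ hn2, List.getElem_map]
    rw [stab order images, ← hS2def]
    rw [PySem.List.pyGetD_eq_getElem _ _ (by omega)
      (by rw [List.length_map]; omega)]
    rw [List.getElem_map]
    simp [hfdef]
lemma outer_foldl (image_order_dict : List (Int × Int)) (l : List (Int × List Int))
    (acc : List Int) (hpre : ∀ c ∈ l, c.2 ≠ []) :
    l.foldl (fun final_selected_images c =>
      let images_in_cluster := c.2
      if images_in_cluster.length ≤ 3 then
        final_selected_images ++ [(PySem.List.min? images_in_cluster (keyOf image_order_dict)).getD 0]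
      else
        let n := pyRound4 images_in_cluster.length
        final_selected_images ++
          [PySem.List.pyGetD (PySem.List.sorted images_in_cluster (keyOf image_order_dict) true) (n : Int) 0]) acc
      = acc ++ l.map (fun c => pickOne c.2 image_order_dict) := by
  induction l generalizing acc with
  | nil => simp
  | cons c l ih =>
    have hc := pick_eq image_order_dict c.2 (hpre c (List.mem_cons_self))
    have hl := fun acc => ih acc (fun x hx => hpre x (List.mem_cons_of_mem _ hx))
    simp only [List.foldl_cons, List.map_cons]
    by_cases h3 : c.2.length ≤ 3
    · simp only [h3, if_true] at hc ⊢
      rw [hl _, hc]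
      simp
    · simp only [h3, if_false] at hc ⊢
      rw [hl _, hc]
      simp

theorem select_by_cluster_spec : Claim_equal_select_by_cluster := by
  intro clusters_ids image_order_dict _hdom hpre
  unfold Spec_select_by_cluster select_by_cluster select_by_cluster_alt
  rw [outer_foldl image_order_dict clusters_ids [] hpre]
  simp
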